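-- pv_equiv track=rewrite | github.com/SmartCouplersMG/CimentacionesSuperficiales | parser.py | classify_from_user
-- ===== SOURCE A (Python) =====
-- def classify_from_user(user_assignment):
--     """
--     Convierte el dict de asignación del usuario a dict cl para gen_combos().
--
--     user_assignment: {pattern_name: category_str}
--     category_str: 'D', 'SD', 'L', 'Lr', 'Le',
--                   'Wx+', 'Wx-', 'Wy+', 'Wy-', 'Sx', 'Sy', 'Ignorar'
--     Retorna cl dict compatible con gen_combos().
--     """
--     cl = {
--         'dead': [], 'superdead': [], 'live': [],
--         'live_roof': [], 'live_eq': [],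
--         'seismic_x': [], 'seismic_y': [],
--         'wind_xp': [], 'wind_xn': [],
--         'wind_yp': [], 'wind_yn': [],
--         'other': [],
--     }
--     _cat_map = {
--         'D': 'dead', 'SD': 'superdead', 'L': 'live',
--         'Lr': 'live_roof', 'Le': 'live_eq',
--         'Wx+': 'wind_xp', 'Wx-': 'wind_xn',
--         'Wy+': 'wind_yp', 'Wy-': 'wind_yn',
--         'Sx': 'seismic_x', 'Sy': 'seismic_y',
--         'Ignorar': 'other',
--     }
--     for pat, cat in user_assignment.items():
--         key = _cat_map.get(cat, 'other')
--         cl[key].append(pat)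
--     return cl
-- ===== SOURCE B (Python) =====
-- _CAT_MAP = {
--     'D': 'dead', 'SD': 'superdead', 'L': 'live',
--     'Lr': 'live_roof', 'Le': 'live_eq',
--     'Wx+': 'wind_xp', 'Wx-': 'wind_xn',
--     'Wy+': 'wind_yp', 'Wy-': 'wind_yn',
--     'Sx': 'seismic_x', 'Sy': 'seismic_y',
--     'Ignorar': 'other',
-- }
--
-- _KEYS = ['dead', 'superdead', 'live', 'live_roof', 'live_eq',
--          'seismic_x', 'seismic_y', 'wind_xp', 'wind_xn',
--          'wind_yp', 'wind_yn', 'other']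
--
--
-- def classify_from_user(user_assignment):
--     """Per-bucket gather: for each of the 12 output keys, collect the
--     patterns whose category maps to that key (unknown -> 'other')."""
--     return {k: [pat for pat, cat in user_assignment.items()
--                 if _CAT_MAP.get(cat, 'other') == k]
--             for k in _KEYS}
-- ===== Notes on version B (the rewrite author's own statement) =====
-- stated objective: alternative
-- what changed: Replaces the single scatter pass that appends each pattern into its bucket dict with a per-bucket gather: a dict comprehension over the 12 fixed output keys, each filtering the items whose mapped category equals that key.
import Mathlib
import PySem

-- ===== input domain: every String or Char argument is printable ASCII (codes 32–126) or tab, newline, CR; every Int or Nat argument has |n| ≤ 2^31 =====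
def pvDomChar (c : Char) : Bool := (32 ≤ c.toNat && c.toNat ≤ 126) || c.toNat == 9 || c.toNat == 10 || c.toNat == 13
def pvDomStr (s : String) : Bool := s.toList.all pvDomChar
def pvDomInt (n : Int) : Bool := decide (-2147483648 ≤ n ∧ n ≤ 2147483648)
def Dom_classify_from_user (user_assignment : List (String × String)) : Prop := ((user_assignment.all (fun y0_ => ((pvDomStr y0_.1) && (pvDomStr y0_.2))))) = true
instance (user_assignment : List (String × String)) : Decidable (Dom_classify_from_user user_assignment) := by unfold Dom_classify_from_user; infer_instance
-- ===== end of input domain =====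

-- B changes the decomposition only (per-bucket gather instead of a single scatter pass); same values, not claimed faster.

-- ===== PORT A =====
-- the _cat_map dict literal (shared text of both Pythons)
def pvCatMap : PySem.Dict String String := PySem.Dict.ofList
  [("D", "dead"), ("SD", "superdead"), ("L", "live"),
   ("Lr", "live_roof"), ("Le", "live_eq"),
   ("Wx+", "wind_xp"), ("Wx-", "wind_xn"),
   ("Wy+", "wind_yp"), ("Wy-", "wind_yn"),
   ("Sx", "seismic_x"), ("Sy", "seismic_y"),
   ("Ignorar", "other")]

-- the initial cl dict literal of A
def pvCl0 : PySem.Dict String (List String) := PySem.Dict.ofList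
  [("dead", []), ("superdead", []), ("live", []),
   ("live_roof", []), ("live_eq", []),
   ("seismic_x", []), ("seismic_y", []),
   ("wind_xp", []), ("wind_xn", []),
   ("wind_yp", []), ("wind_yn", []),
   ("other", [])]

-- A: one pass over the items, appending each pattern into its bucket
def classify_from_user (user_assignment : List (String × String)) : List (String × List String) :=
  (user_assignment.foldl
    (fun cl p => cl.modify (pvCatMap.getD p.2 "other") [] (fun v => v ++ [p.1]))
    pvCl0).items

-- ===== PORT B =====
def pvKeys : List String :=
  ["dead", "superdead", "live", "live_roof", "live_eq",
   "seismic_x", "seismic_y", "wind_xp", "wind_xn",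
   "wind_yp", "wind_yn", "other"]

-- B: for each of the 12 keys, gather the patterns whose mapped category equals that key
def classify_from_user_alt (user_assignment : List (String × String)) : List (String × List String) :=
  pvKeys.map (fun k =>
    (k, (user_assignment.filter (fun p => pvCatMap.getD p.2 "other" == k)).map Prod.fst))

-- ===== PRECONDITION & SPEC =====
def Spec_classify_from_user (user_assignment : List (String × String)) (out : List (String × List String)) : Prop := out = classify_from_user_alt user_assignment
instance (user_assignment : List (String × String)) (out : List (String × List String)) : Decidable (Spec_classify_from_user user_assignment out) := by unfold Spec_classify_from_user; infer_instance

-- ===== CLAIM (what is proved, stated in full; the proofs are below) =====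
def Claim_equal_classify_from_user : Prop := ∀ (user_assignment : List (String × String)), Dom_classify_from_user user_assignment → Spec_classify_from_user user_assignment (classify_from_user user_assignment)

-- ===== LEMMAS AND PROOFS =====

-- pvCatMap.getD always lands in the 12 bucket names
theorem pvCatMap_getD_mem (c : String) : pvCatMap.getD c "other" ∈ pvKeys := by
  rw [PySem.Dict.getD_eq_get?_getD]
  cases hc : pvCatMap.get? c with
  | none => simp [pvKeys]
  | some v =>
    have hmem := PySem.Dict.mem_items_of_get?_eq_some pvCatMap hc
    have hit : pvCatMap.items =
        [("D", "dead"), ("SD", "superdead"), ("L", "live"),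
         ("Lr", "live_roof"), ("Le", "live_eq"),
         ("Wx+", "wind_xp"), ("Wx-", "wind_xn"),
         ("Wy+", "wind_yp"), ("Wy-", "wind_yn"),
         ("Sx", "seismic_x"), ("Sy", "seismic_y"),
         ("Ignorar", "other")] := by decide
    rw [hit] at hmem
    simp only [List.mem_cons, List.not_mem_nil, or_false, Prod.mk.injEq] at hmem
    rcases hmem with ⟨-,rfl⟩|⟨-,rfl⟩|⟨-,rfl⟩|⟨-,rfl⟩|⟨-,rfl⟩|⟨-,rfl⟩|⟨-,rfl⟩|⟨-,rfl⟩|⟨-,rfl⟩|⟨-,rfl⟩|⟨-,rfl⟩|⟨-,rfl⟩ <;> decide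

-- updating a set with elements it already contains leaves it unchanged
theorem pvSet_update_of_mem {α : Type} [BEq α] [LawfulBEq α] (s : PySem.Set α)
    (l : List α) (h : ∀ x ∈ l, x ∈ s) : PySem.Set.update s l = s := by
  induction l generalizing s with
  | nil => rfl
  | cons x xs ih =>
    have hx : PySem.Set.add s x = s := by
      simp [PySem.Set.add, PySem.Set.contains, h x (by simp)]
    simp only [PySem.Set.update, List.foldl_cons]
    rw [show s.add x = PySem.Set.add s x from rfl, hx]
    exact ih s (fun y hy => h y (by simp [hy]))

theorem pvCl0_getD_nil (k : String) (hk : k ∈ pvKeys) : pvCl0.getD k [] = [] := by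
  fin_cases hk <;> decide

-- ===== VERDICT (by name: the statement is the Claim_ definition above) =====
theorem classify_from_user_spec : Claim_equal_classify_from_user := by
  intro l _
  show classify_from_user l = classify_from_user_alt l
  unfold classify_from_user classify_from_user_alt
  have hfold :
      l.foldl (fun cl p => cl.modify (pvCatMap.getD p.2 "other") [] (fun v => v ++ [p.1])) pvCl0
      = (l.map (fun p => (pvCatMap.getD p.2 "other", p.1))).foldl
          (fun cl q => cl.modify q.1 [] (fun v => v ++ [q.2])) pvCl0 := by
    rw [List.foldl_map]
  rw [hfold]
  set m := l.map (fun p => (pvCatMap.getD p.2 "other", p.1)) with hm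
  set d := m.foldl (fun cl q => cl.modify q.1 [] (fun v => v ++ [q.2])) pvCl0 with hd
  have hnd0 : pvCl0.keys.Nodup := by decide
  have hnd : d.keys.Nodup := by
    rw [hd]
    exact PySem.Dict.nodup_keys_foldl_modify_key m Prod.fst [] (fun cl q => fun v => v ++ [q.2]) pvCl0 hnd0
  have hkeys : d.keys = pvKeys := by
    rw [hd, PySem.Dict.keys_foldl_modify_key]
    have : pvCl0.keys = pvKeys := by decide
    rw [this]
    apply pvSet_update_of_mem
    intro x hx
    simp only [hm, List.map_map, List.mem_map, Function.comp] at hx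
    obtain ⟨p, -, hp⟩ := hx
    rw [← hp]
    exact pvCatMap_getD_mem p.2
  rw [PySem.Dict.items_eq_map_keys d hnd ([] : List String), hkeys]
  apply List.map_congr_left
  intro k hk
  have hg : d.getD k [] = pvCl0.getD k [] ++ (m.filter (fun q => q.1 == k)).map (·.2) := by
    rw [hd]; exact PySem.Dict.getD_foldl_modify_append m pvCl0 k
  rw [hg, pvCl0_getD_nil k hk, List.nil_append, hm]
  rw [List.filter_map, List.map_map]
  rfl
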